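-- pv_equiv track=rewrite | github.com/Adam-Jimenez/binarysearch-editorials | Make Palindrome by Adding a Suffix.py | solve
-- ===== SOURCE A (Python) =====
-- def solve(s):
--     ans=len(s)-1
--     for i in range(len(s)):
--         for j,k in ((i,i), (i,i+1)):
--             l,r= expand(j,k,s)
--             if r==len(s)-1:
--                 ans=min(ans,len(s)-(r-l+1))
--     return ans
--
-- def expand(i,j,s):
--     while i>=0 and j<len(s) and s[i]==s[j]:
--         i-=1
--         j+=1
--     i+=1
--     j-=1
--     return i,j
-- ===== SOURCE B (Python) =====
-- def solve(s):
--     # answer = smallest i such that the suffix s[i:] is already a palindrome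
--     for i in range(len(s)):
--         t = s[i:]
--         if t == t[::-1]:
--             return i
--     return 0
-- ===== Notes on version B (the rewrite author's own statement) =====
-- stated objective: simpler
-- what changed: Replaces A's center-expansion search (expand helper over all 2n centers, keeping a running min) by a direct left-to-right scan that returns the first index whose suffix equals its own reverse.
-- intended difference: On the empty string A returns -1 (its accumulator len(s)-1 before any loop iteration), while B returns 0, the intended value: the empty string is already a palindrome so no characters need to be added. — e.g. on solve(""): A returns -1, B returns 0
import Mathlib
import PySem

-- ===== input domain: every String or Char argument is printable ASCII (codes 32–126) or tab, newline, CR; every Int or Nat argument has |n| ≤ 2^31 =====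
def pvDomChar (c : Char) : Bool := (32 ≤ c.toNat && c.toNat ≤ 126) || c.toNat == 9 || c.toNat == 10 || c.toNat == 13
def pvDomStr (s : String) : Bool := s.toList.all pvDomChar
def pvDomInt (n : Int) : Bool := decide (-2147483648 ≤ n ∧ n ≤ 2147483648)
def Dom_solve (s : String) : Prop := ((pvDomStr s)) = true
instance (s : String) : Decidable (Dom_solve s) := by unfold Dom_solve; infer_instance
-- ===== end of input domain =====

-- B replaces A's center-expansion scan by a direct first-palindromic-suffix scan (objective: simpler).

-- ===== PORT A =====
-- `expand`'s while loop; s[i]==s[j] is ported via PySem.List.pyGet? (exact on all calls solve makes: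
-- there the guard's 0 ≤ i and j < len put both indices in range).
def expandGo (c : List Char) (i j : Int) : Int × Int :=
  if h : 0 ≤ i ∧ j < (c.length : Int) ∧ PySem.List.pyGet? c i = PySem.List.pyGet? c j then
    expandGo c (i - 1) (j + 1)
  else (i + 1, j - 1)
termination_by ((c.length : Int) - j).toNat
decreasing_by omega

-- body of A's inner `for j,k in ((i,i),(i,i+1))` loop
def innerStep (c : List Char) (ans : Int) (jk : Int × Int) : Int :=
  let p := expandGo c jk.1 jk.2
  if p.2 = (c.length : Int) - 1 then min ans ((c.length : Int) - (p.2 - p.1 + 1)) else ans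

-- body of A's outer `for i in range(len(s))` loop
def outerStep (c : List Char) (ans : Int) (i : Nat) : Int :=
  [((i : Int), (i : Int)), ((i : Int), (i : Int) + 1)].foldl (innerStep c) ans

def solve (s : String) : Int :=
  let c := s.toList
  (List.range c.length).foldl (outerStep c) ((c.length : Int) - 1)

-- ===== PORT B =====
-- Source B's loop `for i in range(len(s)): if s[i:] == s[i:][::-1]: return i`, early return as recursion;
-- s[i:] (i ≥ 0) is List.drop i, t[::-1] is reverse, string equality is char-list equality (all exact).
def altGo (c : List Char) (i : Nat) : Int :=
  if i < c.length then
    (if c.drop i = (c.drop i).reverse then (i : Int) else altGo c (i + 1))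
  else 0
termination_by c.length - i

def solve_alt (s : String) : Int := altGo s.toList 0

-- ===== PRECONDITION & SPEC =====
-- On the empty string A returns -1 (its accumulator len(s)-1 before any iteration), while B returns 0,
-- the intended value: the empty string is already a palindrome, so no characters need to be added.
def D_solve (s : String) : Prop := s = ""
instance (s : String) : Decidable (D_solve s) := by unfold D_solve; infer_instance

def Spec_solve (s : String) (out : Int) : Prop := ¬ D_solve s → out = solve_alt s
instance (s : String) (out : Int) : Decidable (Spec_solve s out) := by unfold Spec_solve; infer_instance

def pvDiffWitness_solve : String := ""
def pvDiffWitnessOut_solve : Int × Int := (-1, 0)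

-- ===== CLAIM (what is proved, stated in full; the proofs are below) =====
def Claim_unchanged_solve : Prop := ∀ (s : String), Dom_solve s → Spec_solve s (solve s)
def Claim_changed_solve : Prop := Dom_solve (pvDiffWitness_solve) ∧ D_solve (pvDiffWitness_solve) ∧ solve (pvDiffWitness_solve) = pvDiffWitnessOut_solve.1 ∧ solve_alt (pvDiffWitness_solve) = pvDiffWitnessOut_solve.2 ∧ pvDiffWitnessOut_solve.1 ≠ pvDiffWitnessOut_solve.2
def Claim_exact_solve : Prop := ∀ (s : String), Dom_solve s → D_solve s → solve s ≠ solve_alt s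

-- ===== LEMMAS AND PROOFS =====

-- mirror symmetry of c about the fixed sum a + b, between positions a and b
def Mir (c : List Char) (a b : Int) : Prop :=
  ∀ p q : Int, a ≤ p → p ≤ q → q ≤ b → p + q = a + b →
    c.getD p.toNat ' ' = c.getD q.toNat ' '

theorem mir_vacuous (c : List Char) (a b : Int) (h : b < a) : Mir c a b := by
  intro p q h1 h2 h3 _
  omega

theorem pal_short (d : List Char) (h : d.length ≤ 1) : d = d.reverse := by
  match d with
  | [] => rfl
  | [a] => rfl
  | a :: b :: t => simp at h

theorem mir_of_pal (cs : List Char) (l : Nat)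
    (hp : cs.drop l = (cs.drop l).reverse) : Mir cs (l : Int) ((cs.length : Int) - 1) := by
  intro p q h1 h2 h3 hsum
  have hdl : (cs.drop l).length = cs.length - l := List.length_drop ..
  have hrev : ∀ (k : Nat) (hk : k < (cs.drop l).length),
      (cs.drop l)[k] = (cs.drop l)[(cs.drop l).length - 1 - k]'(by omega) := by
    intro k hk
    have h2' : k < (cs.drop l).reverse.length := by simpa using hk
    have h3' : (cs.drop l).reverse[k]'h2' = (cs.drop l)[(cs.drop l).length - 1 - k]'(by omega) :=
      List.getElem_reverse ..
    rw [← h3']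
    exact List.getElem_of_eq hp hk
  have hplt : p.toNat < cs.length := by omega
  have hqlt : q.toNat < cs.length := by omega
  have hk1 : p.toNat - l < (cs.drop l).length := by omega
  have e1 : (cs.drop l)[p.toNat - l]'hk1 = cs[p.toNat]'hplt := by
    simp only [List.getElem_drop]
    congr 1 <;> omega
  have e2 : (cs.drop l)[q.toNat - l]'(by omega) = cs[q.toNat]'hqlt := by
    simp only [List.getElem_drop]
    congr 1 <;> omega
  have hmain : (cs.drop l)[p.toNat - l]'hk1 = (cs.drop l)[q.toNat - l]'(by omega) := by
    rw [hrev (p.toNat - l) hk1]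
    congr 1 <;> omega
  rw [List.getD_eq_getElem cs ' ' hplt, List.getD_eq_getElem cs ' ' hqlt, ← e1, ← e2]
  exact hmain

theorem pal_of_mir (cs : List Char) (l : Nat) (hl : l ≤ cs.length)
    (hm : Mir cs (l : Int) ((cs.length : Int) - 1)) : cs.drop l = (cs.drop l).reverse := by
  apply List.ext_getElem (by simp)
  intro k h1 h2
  have hdl : (cs.drop l).length = cs.length - l := List.length_drop ..
  have hrv : (cs.drop l).reverse[k]'h2 = (cs.drop l)[(cs.drop l).length - 1 - k]'(by omega) :=
    List.getElem_reverse ..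
  rw [hrv]
  have e1 : (cs.drop l)[k]'h1 = cs[l + k]'(by omega) := by simp [List.getElem_drop]
  have e2 : (cs.drop l)[(cs.drop l).length - 1 - k]'(by omega)
      = cs[l + ((cs.drop l).length - 1 - k)]'(by omega) := by simp [List.getElem_drop]
  rw [e1, e2, ← List.getD_eq_getElem cs ' ' (show l + k < cs.length by omega),
      ← List.getD_eq_getElem cs ' ' (show l + ((cs.drop l).length - 1 - k) < cs.length by omega)]
  rcases Nat.le_total (l + k) (l + ((cs.drop l).length - 1 - k)) with hle | hlt
  · have := hm ((l + k : Nat) : Int) ((l + ((cs.drop l).length - 1 - k) : Nat) : Int)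
      (by omega) (by omega) (by omega) (by omega)
    simpa using this
  · have := hm ((l + ((cs.drop l).length - 1 - k) : Nat) : Int) ((l + k : Nat) : Int)
      (by omega) (by omega) (by omega) (by omega)
    simpa using this.symm

theorem expand_sound (cs : List Char) (i j : Int) (hi : -1 ≤ i) (hm : Mir cs (i + 1) (j - 1)) :
    0 ≤ (expandGo cs i j).1 ∧ (expandGo cs i j).1 + (expandGo cs i j).2 = i + j ∧
      Mir cs (expandGo cs i j).1 (expandGo cs i j).2 := by
  revert hi hm
  fun_induction expandGo cs i j with
  | case1 i j h ih =>
    intro hi hm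
    obtain ⟨h0, hjn, hcc⟩ := h
    have hmm : Mir cs (i - 1 + 1) (j + 1 - 1) := by
      have heq : ∀ (_ : i < (cs.length : Int)) (_ : 0 ≤ j), cs.getD i.toNat ' ' = cs.getD j.toNat ' ' := by
        intro hin hj0
        have e1 := PySem.List.pyGet?_eq_some_getElem cs h0 hin
        have e2 := PySem.List.pyGet?_eq_some_getElem cs hj0 hjn
        rw [e1, e2] at hcc
        rw [List.getD_eq_getElem cs ' ' (by omega), List.getD_eq_getElem cs ' ' (by omega)]
        exact Option.some.inj hcc
      intro p q hp hpq hq hsum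
      by_cases hpi : p = i
      · have hqj : q = j := by omega
        subst hpi; subst hqj
        exact heq (by omega) (by omega)
      · exact hm p q (by omega) hpq (by omega) (by omega)
    have := ih (by omega) hmm
    refine ⟨this.1, by omega, this.2.2⟩
  | case2 i j h =>
    intro hi hm
    exact ⟨show (0:Int) ≤ i + 1 by omega, show (i + 1) + (j - 1) = i + j by ring, hm⟩

theorem expand_reach (cs : List Char) (l0 : Nat) (hl0 : l0 < cs.length)
    (hm : Mir cs (l0 : Int) ((cs.length : Int) - 1)) :
    ∀ (k : Nat) (i j : Int), i + j = (l0 : Int) + ((cs.length : Int) - 1) →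
      (l0 : Int) - 1 ≤ i → i ≤ j + 1 → (i - ((l0 : Int) - 1)).toNat = k →
      expandGo cs i j = ((l0 : Int), (cs.length : Int) - 1) := by
  intro k
  induction k with
  | zero =>
    intro i j hsum hil hij hk
    have hi : i = (l0 : Int) - 1 := by omega
    have hj : j = (cs.length : Int) := by omega
    rw [expandGo, dif_neg (by omega)]
    rw [show i + 1 = (l0 : Int) by omega, show j - 1 = (cs.length : Int) - 1 by omega]
  | succ k ih =>
    intro i j hsum hil hij hk
    have hi0 : (l0 : Int) ≤ i := by omega
    have hjn : j < (cs.length : Int) := by omega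
    have hin : i < (cs.length : Int) := by omega
    have hj0 : (0:Int) ≤ j := by omega
    have hcc : PySem.List.pyGet? cs i = PySem.List.pyGet? cs j := by
      rw [PySem.List.pyGet?_eq_some_getElem cs (by omega) hin,
          PySem.List.pyGet?_eq_some_getElem cs hj0 hjn]
      rw [← List.getD_eq_getElem cs ' ' (by omega), ← List.getD_eq_getElem cs ' ' (by omega)]
      rcases Int.le_total i j with hle | hge
      · exact congrArg some (hm i j hi0 hle (by omega) (by omega))
      · have hji : j ≤ i := hge
        have hl0j : (l0 : Int) ≤ j := by
          by_contra hc
          omega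
      -- j ≥ l0: else j = l0-1, i = j+1 = l0, sum forces l0 = n, contradiction
        exact congrArg some (hm j i hl0j hji (by omega) (by omega)).symm
    rw [expandGo, dif_pos ⟨by omega, hjn, hcc⟩]
    exact ih (i - 1) (j + 1) (by omega) (by omega) (by omega) (by omega)

theorem altGo_eq (cs : List Char) (l0 : Nat) (h0 : l0 < cs.length)
    (hp : cs.drop l0 = (cs.drop l0).reverse)
    (hmin : ∀ m, m < l0 → ¬ (cs.drop m = (cs.drop m).reverse)) :
    ∀ (k i : Nat), i ≤ l0 → l0 - i = k → altGo cs i = (l0 : Int) := by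
  intro k
  induction k with
  | zero =>
    intro i hi hk
    have : i = l0 := by omega
    subst this
    rw [altGo, if_pos h0, if_pos hp]
  | succ k ih =>
    intro i hi hk
    have hil : i < l0 := by omega
    rw [altGo, if_pos (by omega), if_neg (hmin i hil)]
    exact ih (i + 1) (by omega) (by omega)

theorem innerStep_le (cs : List Char) (ans : Int) (jk : Int × Int) :
    innerStep cs ans jk ≤ ans := by
  unfold innerStep
  dsimp only
  split
  · exact min_le_left _ _
  · exact le_refl _

theorem outerStep_le (cs : List Char) (ans : Int) (i : Nat) :
    outerStep cs ans i ≤ ans := by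
  unfold outerStep
  simp only [List.foldl]
  exact le_trans (innerStep_le ..) (innerStep_le ..)

theorem foldl_outer_le (cs : List Char) (xs : List Nat) :
    ∀ ans, List.foldl (outerStep cs) ans xs ≤ ans := by
  induction xs with
  | nil => intro ans; simp
  | cons x t ih =>
    intro ans
    simp only [List.foldl]
    exact le_trans (ih _) (outerStep_le ..)

theorem innerStep_lb (cs : List Char) (l0 : Nat)
    (hleast : ∀ m : Nat, m ≤ cs.length → cs.drop m = (cs.drop m).reverse → l0 ≤ m)
    (jk : Int × Int) (h1 : -1 ≤ jk.1) (hm : Mir cs (jk.1 + 1) (jk.2 - 1))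
    (ans : Int) (h : (l0 : Int) ≤ ans) : (l0 : Int) ≤ innerStep cs ans jk := by
  unfold innerStep
  dsimp only
  split_ifs with hc
  · obtain ⟨hl, hsum, hmir2⟩ := expand_sound cs jk.1 jk.2 h1 hm
    rw [hc] at hmir2
    have hv : (l0 : Int) ≤ (expandGo cs jk.1 jk.2).1 := by
      by_cases hlen : (expandGo cs jk.1 jk.2).1.toNat ≤ cs.length
      · have hmir3 : Mir cs (((expandGo cs jk.1 jk.2).1.toNat : Nat) : Int) ((cs.length : Int) - 1) := by
          rw [Int.toNat_of_nonneg hl]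
          exact hmir2
        have := hleast _ hlen (pal_of_mir cs _ hlen hmir3)
        omega
      · have := hleast cs.length (le_refl _) (by simp)
        omega
    rw [hc]
    refine le_min h ?_
    omega
  · exact h

theorem outerStep_lb (cs : List Char) (l0 : Nat)
    (hleast : ∀ m : Nat, m ≤ cs.length → cs.drop m = (cs.drop m).reverse → l0 ≤ m)
    (i : Nat) (ans : Int) (h : (l0 : Int) ≤ ans) : (l0 : Int) ≤ outerStep cs ans i := by
  unfold outerStep
  simp only [List.foldl]
  refine innerStep_lb cs l0 hleast ((i : Int), (i : Int) + 1) (by omega)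
    (mir_vacuous cs _ _ (by omega)) _ ?_
  exact innerStep_lb cs l0 hleast ((i : Int), (i : Int)) (by omega)
    (mir_vacuous cs _ _ (by omega)) _ h

theorem foldl_outer_lb (cs : List Char) (l0 : Nat)
    (hleast : ∀ m : Nat, m ≤ cs.length → cs.drop m = (cs.drop m).reverse → l0 ≤ m)
    (xs : List Nat) : ∀ ans, (l0 : Int) ≤ ans → (l0 : Int) ≤ List.foldl (outerStep cs) ans xs := by
  induction xs with
  | nil => intro ans h; simpa using h
  | cons x t ih =>
    intro ans h
    simp only [List.foldl]
    exact ih _ (outerStep_lb cs l0 hleast x ans h)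

theorem foldl_outer_reach (cs : List Char) (l0 : Nat) (istar : Nat)
    (hstep : ∀ ans, outerStep cs ans istar ≤ (l0 : Int)) :
    ∀ (xs : List Nat) (ans : Int), istar ∈ xs → List.foldl (outerStep cs) ans xs ≤ (l0 : Int) := by
  intro xs
  induction xs with
  | nil => intro ans h; cases h
  | cons x t ih =>
    intro ans hmem
    simp only [List.foldl]
    rcases List.mem_cons.mp hmem with heq | hmem'
    · subst heq
      exact le_trans (foldl_outer_le cs t _) (hstep ans)
    · exact ih _ hmem'

theorem solve_eq_solve_alt (s : String) (hne : s ≠ "") : solve s = solve_alt s := by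
  have hcne : s.toList ≠ [] := by
    intro h
    exact hne (by simpa using h)
  have hn1 : 1 ≤ s.toList.length := List.length_pos_of_ne_nil hcne
  have hex : ∃ m, m < s.toList.length ∧ s.toList.drop m = (s.toList.drop m).reverse :=
    ⟨s.toList.length - 1, by omega, pal_short _ (by simp; omega)⟩
  have hl0 := Nat.find_spec hex
  have hminp : ∀ m, m < Nat.find hex → ¬ (s.toList.drop m = (s.toList.drop m).reverse) := by
    intro m hm hpal
    exact Nat.find_min hex hm ⟨by omega, hpal⟩
  have hleast : ∀ m : Nat, m ≤ s.toList.length →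
      s.toList.drop m = (s.toList.drop m).reverse → Nat.find hex ≤ m := by
    intro m hm hpal
    by_cases hmn : m < s.toList.length
    · exact Nat.find_le ⟨hmn, hpal⟩
    · omega
  have hB : solve_alt s = ((Nat.find hex : Nat) : Int) :=
    altGo_eq s.toList (Nat.find hex) hl0.1 hl0.2 hminp (Nat.find hex) 0 (Nat.zero_le _) rfl
  have hmir := mir_of_pal s.toList (Nat.find hex) hl0.2
  have hreach := expand_reach s.toList (Nat.find hex) hl0.1 hmir
  have hstep : ∀ ans, outerStep s.toList ans ((Nat.find hex + (s.toList.length - 1)) / 2)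
      ≤ ((Nat.find hex : Nat) : Int) := by
    intro ans
    unfold outerStep
    simp only [List.foldl]
    rcases Nat.mod_two_eq_zero_or_one (Nat.find hex + (s.toList.length - 1)) with hpar | hpar
    · -- odd-length suffix: the center (i, i) expands exactly to it
      have hx := hreach _ (((Nat.find hex + (s.toList.length - 1)) / 2 : Nat) : Int)
        (((Nat.find hex + (s.toList.length - 1)) / 2 : Nat) : Int)
        (by push_cast; omega) (by push_cast; omega) (by omega) rfl
      have h1 : innerStep s.toList ans
          ((((Nat.find hex + (s.toList.length - 1)) / 2 : Nat) : Int),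
           (((Nat.find hex + (s.toList.length - 1)) / 2 : Nat) : Int))
          ≤ ((Nat.find hex : Nat) : Int) := by
        unfold innerStep
        dsimp only
        rw [hx]
        rw [if_pos rfl]
        refine le_trans (min_le_right _ _) ?_
        omega
      exact le_trans (innerStep_le ..) h1
    · -- even-length suffix: the center (i, i+1) expands exactly to it
      have hx := hreach _ (((Nat.find hex + (s.toList.length - 1)) / 2 : Nat) : Int)
        ((((Nat.find hex + (s.toList.length - 1)) / 2 : Nat) : Int) + 1)
        (by push_cast; omega) (by push_cast; omega) (by omega) rfl
      have h1 : ∀ b : Int, innerStep s.toList b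
          ((((Nat.find hex + (s.toList.length - 1)) / 2 : Nat) : Int),
           (((Nat.find hex + (s.toList.length - 1)) / 2 : Nat) : Int) + 1)
          ≤ ((Nat.find hex : Nat) : Int) := by
        intro b
        unfold innerStep
        dsimp only
        rw [hx]
        rw [if_pos rfl]
        refine le_trans (min_le_right _ _) ?_
        omega
      exact h1 _
  have histar : (Nat.find hex + (s.toList.length - 1)) / 2 ∈ List.range s.toList.length :=
    List.mem_range.mpr (by omega)
  have hub := foldl_outer_reach s.toList (Nat.find hex) _ hstep (List.range s.toList.length)
    ((s.toList.length : Int) - 1) histar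
  have hlb := foldl_outer_lb s.toList (Nat.find hex) hleast (List.range s.toList.length)
    ((s.toList.length : Int) - 1) (by omega)
  have hA : solve s = ((Nat.find hex : Nat) : Int) := le_antisymm hub hlb
  rw [hA, hB]

-- ===== VERDICT (by name: the statement is the Claim_ definition above) =====
theorem solve_spec : Claim_unchanged_solve := by
  intro s _ hD
  exact solve_eq_solve_alt s hD

theorem solve_changed : Claim_changed_solve := by
  unfold Claim_changed_solve
  refine ⟨by decide, by decide, by decide, ?_, by decide⟩
  show altGo "".toList 0 = 0
  rw [altGo]
  simp

theorem solve_tight : Claim_exact_solve := by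
  intro s _ hD
  unfold D_solve at hD
  subst hD
  have h1 : solve "" = -1 := by decide
  have h2 : solve_alt "" = 0 := by
    show altGo "".toList 0 = 0
    rw [altGo]; simp
  rw [h1, h2]; decide
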